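-- pv_equiv track=rewrite | github.com/tomdif/jt-gravity-from-convex-subsets | scripts/08_curved_vs_flat.py | enumerate_cc_variable_width
-- ===== SOURCE A (Python) =====
-- def enumerate_cc_variable_width(row_widths):
--     """Enumerate all convex subsets of a variable-width 2D grid.
--     Row i has width row_widths[i]. Cells: (row, col) with 0 ≤ col < row_widths[row].
--     Product order: (r1,c1) ≤ (r2,c2) iff r1≤r2 and c1≤c2."""
--     n_rows = len(row_widths)
--     cells = [(r,c) for r in range(n_rows) for c in range(row_widths[r])]
--     n = len(cells)
--     cell_set = set(cells)
--
--     results = []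
--     for bits in range(1 << n):
--         S = frozenset(cells[k] for k in range(n) if bits & (1 << k))
--
--         # Check convexity
--         convex = True
--         for a in S:
--             if not convex: break
--             for b in S:
--                 if not convex: break
--                 if a[0] <= b[0] and a[1] <= b[1]:
--                     for r in range(a[0], b[0]+1):
--                         for c in range(a[1], b[1]+1):
--                             if (r,c) in cell_set and (r,c) not in S:
--                                 convex = False; break
--                             # If (r,c) not in grid at all: need to check
--                             # Actually for variable-width grids, (r,c) might not exist
--                             # Convexity only requires cells that EXIST in the grid
--                             if (r,c) not in cell_set:
--                                 # Cell doesn't exist — is this a problem?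
--                                 # For product-order convexity on the SUBPOSET:
--                                 # we only check cells that are in the poset
--                                 pass
--                         if not convex: break
--
--         if convex:
--             # Compute S_BD: |S| - links
--             links = 0
--             for (r,c) in S:
--                 if (r+1,c) in S: links += 1
--                 if (r,c+1) in S: links += 1
--             sbd = len(S) - links
--             results.append((sbd, len(S), S))
--
--     return results
-- ===== SOURCE B (Python) =====
-- def enumerate_cc_variable_width(row_widths):
--     """Enumerate all convex subsets of a variable-width 2D grid.
--     Cell-centric convexity test: a subset S is convex iff no grid cell outside S
--     is sandwiched (in the product order) between two members of S."""
--     n_rows = len(row_widths)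
--     cells = [(r, c) for r in range(n_rows) for c in range(row_widths[r])]
--     n = len(cells)
--     results = []
--     for bits in range(1 << n):
--         S = [cells[k] for k in range(n) if bits >> k & 1]
--         convex = all(
--             x in S
--             or not any(a[0] <= x[0] and a[1] <= x[1] for a in S)
--             or not any(x[0] <= b[0] and x[1] <= b[1] for b in S)
--             for x in cells
--         )
--         if convex:
--             links = sum(
--                 1
--                 for a in S
--                 for b in S
--                 if b == (a[0] + 1, a[1]) or b == (a[0], a[1] + 1)
--             )
--             results.append((len(S) - links, len(S), frozenset(S)))
--     return results
-- ===== Notes on version B (the rewrite author's own statement) =====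
-- stated objective: faster
-- what changed: Replaces A's quadruple loop (for every ordered pair of subset members, rescan the whole rectangle between them) by a single cell-centric test -- a subset is convex iff no grid cell outside it dominates some member and is dominated by another -- and counts adjacency links by pair scanning instead of set lookups per member. (asymptotically cheaper per subset; end-to-end timing was not measurable because the 2^n enumeration times out on both sides at the probe size)
import Mathlib
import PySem

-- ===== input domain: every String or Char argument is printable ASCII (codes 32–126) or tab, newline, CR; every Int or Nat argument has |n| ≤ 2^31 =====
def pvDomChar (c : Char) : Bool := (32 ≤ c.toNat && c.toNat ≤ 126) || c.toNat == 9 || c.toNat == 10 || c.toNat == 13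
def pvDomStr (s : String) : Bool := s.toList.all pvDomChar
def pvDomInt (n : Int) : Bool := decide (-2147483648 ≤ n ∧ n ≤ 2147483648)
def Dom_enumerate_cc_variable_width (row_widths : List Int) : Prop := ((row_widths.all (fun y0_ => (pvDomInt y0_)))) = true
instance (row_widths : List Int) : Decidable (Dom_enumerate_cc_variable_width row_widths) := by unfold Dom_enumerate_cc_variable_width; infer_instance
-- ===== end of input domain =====

-- B replaces A's per-pair rectangle-rescan convexity check by a cell-centric test (a subset is
-- convex iff no outside grid cell is sandwiched between two members) and counts links by pair
-- scanning; objective: a faster per-subset test (speed-up not measured end to end).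

-- ===== PORT A =====
-- shared setup lines (identical in both Pythons): the cell list and the subset selected by 'bits'
def pvCellsOf (row_widths : List Int) : List (Int × Int) :=
  (PySem.List.pyRange 0 (row_widths.length : Int) 1).foldl
    (fun acc r => acc ++ (PySem.List.pyRange 0 (PySem.List.pyGetD row_widths r 0) 1).map (fun c => (r, c))) []

-- 'bits & (1 << k)' truthiness ported exactly as Nat.testBit (bits is a nonnegative range element)
def pvSubsetOf (cells : List (Int × Int)) (bits : Int) : List (Int × Int) :=
  (PySem.List.pyRange 0 (cells.length : Int) 1).foldl
    (fun acc k => if bits.toNat.testBit k.toNat then acc ++ [PySem.List.pyGetD cells k (0, 0)] else acc) []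

-- A-side helpers: A's convexity quadruple loop with its early-exit flag, and A's link count
def pvConvexA (cell_set S : PySem.Set (Int × Int)) : Bool :=
  S.foldl (fun cv a =>
    if cv = false then cv else
    S.foldl (fun cv b =>
      if cv = false then cv else
      if a.1 ≤ b.1 ∧ a.2 ≤ b.2 then
        (PySem.List.pyRange a.1 (b.1 + 1) 1).foldl (fun cv r =>
          if cv = false then cv else
          (PySem.List.pyRange a.2 (b.2 + 1) 1).foldl (fun cv c =>
            if cv = false then cv else
            if (r, c) ∈ cell_set ∧ ¬ ((r, c) ∈ S) then false else cv) cv) cv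
      else cv) cv) true

def pvLinksA (S : PySem.Set (Int × Int)) : Int :=
  S.foldl (fun links rc =>
    let links1 := if (rc.1 + 1, rc.2) ∈ S then links + 1 else links
    if (rc.1, rc.2 + 1) ∈ S then links1 + 1 else links1) 0

def enumerate_cc_variable_width (row_widths : List Int) : List (Int × Int × (List (Int × Int))) :=
  let cells := pvCellsOf row_widths
  let cell_set : PySem.Set (Int × Int) := PySem.Set.ofList cells
  (PySem.List.pyRange 0 ((2 : Int) ^ cells.length) 1).foldl (fun results bits =>
    let S : PySem.Set (Int × Int) := PySem.Set.ofList (pvSubsetOf cells bits)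
    if pvConvexA cell_set S then
      results ++ [(((S.length : Int) - pvLinksA S), (S.length : Int), (S : List (Int × Int)))]
    else results) []

-- ===== PORT B =====
-- B-side helpers: the sandwiched-cell convexity test and the pair-counting link sum
def pvConvexB (cells S : List (Int × Int)) : Bool :=
  cells.all (fun x =>
    decide (x ∈ S)
    || ! S.any (fun a => decide (a.1 ≤ x.1 ∧ a.2 ≤ x.2))
    || ! S.any (fun b => decide (x.1 ≤ b.1 ∧ x.2 ≤ b.2)))

def pvLinksB (S : List (Int × Int)) : Int :=
  S.foldl (fun acc a =>
    S.foldl (fun acc2 b =>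
      if b = (a.1 + 1, a.2) ∨ b = (a.1, a.2 + 1) then acc2 + 1 else acc2) acc) 0

def enumerate_cc_variable_width_alt (row_widths : List Int) : List (Int × Int × (List (Int × Int))) :=
  let cells := pvCellsOf row_widths
  (PySem.List.pyRange 0 ((2 : Int) ^ cells.length) 1).foldl (fun results bits =>
    let S := pvSubsetOf cells bits
    if pvConvexB cells S then
      results ++ [(((S.length : Int) - pvLinksB S), (S.length : Int), (PySem.Set.ofList S : List (Int × Int)))]
    else results) []

-- ===== PRECONDITION & SPEC =====
def Spec_enumerate_cc_variable_width (row_widths : List Int) (out : List (Int × Int × (List (Int × Int)))) : Prop := out = enumerate_cc_variable_width_alt row_widths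
instance (row_widths : List Int) (out : List (Int × Int × (List (Int × Int)))) : Decidable (Spec_enumerate_cc_variable_width row_widths out) := by unfold Spec_enumerate_cc_variable_width; infer_instance

-- ===== CLAIM (what is proved, stated in full; the proofs are below) =====
def Claim_equal_enumerate_cc_variable_width : Prop := ∀ (row_widths : List Int), Dom_enumerate_cc_variable_width row_widths → Spec_enumerate_cc_variable_width row_widths (enumerate_cc_variable_width row_widths)

-- ===== LEMMAS AND PROOFS =====

-- a fold whose step keeps 'false' absorbing computes 'b && all of the true-step'
theorem pvFoldlGuard {α : Type} (xs : List α) (f : Bool → α → Bool)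
    (hf : ∀ x, f false x = false) :
    ∀ b : Bool, xs.foldl f b = (b && xs.all (fun x => f true x)) := by
  induction xs with
  | nil => intro b; simp
  | cons x t ih =>
    intro b
    cases b with
    | false => simp [List.foldl, hf, ih]
    | true =>
      simp only [List.foldl, List.all_cons]
      cases h : f true x <;> simp [ih]

theorem pvCellsOf_eq (row_widths : List Int) :
    pvCellsOf row_widths =
      (PySem.List.pyRange 0 (row_widths.length : Int) 1).flatMap
        (fun r => (PySem.List.pyRange 0 (PySem.List.pyGetD row_widths r 0) 1).map (fun c => (r, c))) := by
  simp [pvCellsOf, List.flatMap_def]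

-- a flatMap whose pieces are tagged by distinct first components has no duplicates
theorem pvNodupFlatMap (rs : List Int) (f : Int → List (Int × Int))
    (h1 : rs.Nodup) (h2 : ∀ r, (f r).Nodup) (h3 : ∀ r x, x ∈ f r → x.1 = r) :
    (rs.flatMap f).Nodup := by
  induction rs with
  | nil => simp
  | cons a t ih =>
    simp only [List.flatMap_cons]
    rw [List.nodup_append]
    refine ⟨h2 a, ih (List.nodup_cons.1 h1).2, ?_⟩
    intro x hx y hy hxy
    rcases List.mem_flatMap.1 hy with ⟨r, hr, hyr⟩
    have hxa := h3 a x hx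
    have hyr' := h3 r y hyr
    subst hxy
    exact (List.nodup_cons.1 h1).1 (by rw [hxa] at hyr'; rw [hyr']; exact hr)

theorem pvCellsOf_nodup (row_widths : List Int) : (pvCellsOf row_widths).Nodup := by
  rw [pvCellsOf_eq]
  apply pvNodupFlatMap
  · exact PySem.List.nodup_pyRange_one _ _
  · intro r
    exact (PySem.List.nodup_pyRange_one _ _).map (fun c c' h => by injection h)
  · intro r x hx
    rcases List.mem_map.1 hx with ⟨c, _, rfl⟩
    rfl

theorem pvSubsetOf_eq (cells : List (Int × Int)) (bits : Int) :
    pvSubsetOf cells bits =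
      ((PySem.List.pyRange 0 (cells.length : Int) 1).filter (fun k => bits.toNat.testBit k.toNat)).map
        (fun k => PySem.List.pyGetD cells k (0, 0)) := by
  simp [pvSubsetOf, PySem.List.foldl_append_if]

theorem pvSubsetOf_nodup (cells : List (Int × Int)) (h : cells.Nodup) (bits : Int) :
    (pvSubsetOf cells bits).Nodup := by
  rw [pvSubsetOf_eq]
  apply List.Nodup.map_on
  · intro k hk k' hk' heq
    have hm := PySem.List.mem_pyRange_one.1 (List.mem_filter.1 hk).1
    have hm' := PySem.List.mem_pyRange_one.1 (List.mem_filter.1 hk').1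
    rw [PySem.List.pyGetD_eq_getElem _ _ hm.1 (by exact_mod_cast hm.2),
        PySem.List.pyGetD_eq_getElem _ _ hm'.1 (by exact_mod_cast hm'.2)] at heq
    have hlt : k.toNat < cells.length := by omega
    have hlt' : k'.toNat < cells.length := by omega
    have := List.nodup_iff_injective_get.1 h
      (a₁ := ⟨k.toNat, hlt⟩) (a₂ := ⟨k'.toNat, hlt'⟩) (by simpa [List.get_eq_getElem] using heq)
    have : k.toNat = k'.toNat := by simpa using congrArg Fin.val this
    omega
  · exact (PySem.List.nodup_pyRange_one _ _).filter _

theorem pvFoldlGuard_iff {α : Type} (xs : List α) (f : Bool → α → Bool)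
    (hf : ∀ x, f false x = false) :
    (xs.foldl f true = true) ↔ ∀ x ∈ xs, f true x = true := by
  rw [pvFoldlGuard xs f hf true]
  simp [List.all_eq_true]

theorem pvGuard_iff {α : Type} (xs : List α) (g : Bool → α → Bool) :
    (xs.foldl (fun cv x => if cv = false then cv else g cv x) true = true) ↔ ∀ x ∈ xs, g true x = true := by
  rw [pvFoldlGuard_iff _ _ (fun x => rfl)]
  constructor <;> intro h x hx <;> have := h x hx <;> simpa using this

theorem pvConvex_eq (cells S : List (Int × Int)) :
    pvConvexA (PySem.Set.ofList cells) S = pvConvexB cells S := by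
  apply (fun x y : Bool => by cases x <;> cases y <;> simp : ∀ x y : Bool, (x = true ↔ y = true) → x = y)
  unfold pvConvexA pvConvexB
  simp [pvGuard_iff, PySem.Set.mem_ofList, PySem.List.mem_pyRange_one, List.all_eq_true]
  constructor
  · intro h x y hxy
    by_cases hxS : (x, y) ∈ S
    · exact Or.inl (Or.inl hxS)
    by_cases hA' : ∃ p q, (p, q) ∈ S ∧ p ≤ x ∧ q ≤ y
    · obtain ⟨p, q, hpq, hp, hq⟩ := hA'
      right
      intro u v huv hxu
      by_contra hvy
      push_neg at hvy
      rcases h p q hpq u v huv with (h' | h') | hrect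
      · omega
      · omega
      · rcases hrect x (by omega) (by omega) y (by omega) (by omega) with hnc | hs
        · exact absurd hxy hnc
        · exact absurd hs hxS
    · left; right
      intro p q hpq hple
      by_contra hq
      push_neg at hq
      exact hA' ⟨p, q, hpq, hple, hq⟩
  · intro h a b hab a2 b1 ha2b1
    by_cases h1 : a2 < a ∨ b1 < b
    · exact Or.inl h1
    push_neg at h1
    right
    intro x hax hxa2 y hby hyb1
    by_cases hc : (x, y) ∈ cells
    · rcases h x y hc with (hs | hup) | hdown
      · exact Or.inr hs
      · exfalso; have := hup a b hab (by omega); omega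
      · exfalso; have := hdown a2 b1 ha2b1 (by omega); omega
    · exact Or.inl hc

theorem pvCountPair (S : List (Int × Int)) (hS : S.Nodup) (v1 v2 : Int × Int) (hne : v1 ≠ v2) :
    ((S.countP (fun b => decide (b = v1 ∨ b = v2)) : Nat) : Int) =
      (if v1 ∈ S then (1 : Int) else 0) + (if v2 ∈ S then (1 : Int) else 0) := by
  induction S with
  | nil => simp
  | cons x t ih =>
    have hx : x ∉ t := (List.nodup_cons.1 hS).1
    have ih' := ih (List.nodup_cons.1 hS).2
    simp only [List.countP_cons, List.mem_cons]
    by_cases h1 : x = v1 <;> by_cases h2 : x = v2 <;>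
      simp_all <;> split_ifs <;> simp_all

theorem pvLinks_eq (S : List (Int × Int)) (hS : S.Nodup) :
    pvLinksA S = pvLinksB S := by
  suffices h : ∀ (T : List (Int × Int)) (init : Int),
      T.foldl (fun links rc =>
        let links1 := if (rc.1 + 1, rc.2) ∈ S then links + 1 else links
        if (rc.1, rc.2 + 1) ∈ S then links1 + 1 else links1) init =
      T.foldl (fun acc a =>
        S.foldl (fun acc2 b => if b = (a.1 + 1, a.2) ∨ b = (a.1, a.2 + 1) then acc2 + 1 else acc2) acc) init by
    exact h S 0
  intro T
  induction T with
  | nil => intro init; rfl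
  | cons x t ih =>
    intro init
    simp only [List.foldl_cons]
    rw [ih]
    congr 1
    rw [PySem.List.foldl_ite_add_one (fun b => b = (x.1 + 1, x.2) ∨ b = (x.1, x.2 + 1)) S init]
    rw [pvCountPair S hS _ _ (by intro h; injection h with h1 h2; omega)]
    split_ifs <;> ring

-- ===== VERDICT (by name: the statement is the Claim_ definition above) =====
theorem enumerate_cc_variable_width_spec : Claim_equal_enumerate_cc_variable_width := by
  intro row_widths _
  unfold Spec_enumerate_cc_variable_width
  unfold enumerate_cc_variable_width enumerate_cc_variable_width_alt
  apply PySem.List.foldl_congr_mem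
  intro acc bits _
  have hc := pvCellsOf_nodup row_widths
  have hs := pvSubsetOf_nodup _ hc bits
  have hofl : PySem.Set.ofList (pvSubsetOf (pvCellsOf row_widths) bits) = pvSubsetOf (pvCellsOf row_widths) bits :=
    PySem.Set.ofList_eq_self_of_nodup _ hs
  simp only [hofl, pvConvex_eq _ _, pvLinks_eq _ hs]
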